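-- pv_equiv track=rewrite | github.com/Oushesh/CODING_INTERVIEW | interviewing.io/Facebook/min_steps_2_1.py | steps_2_1
-- ===== SOURCE A (Python) =====
-- def steps_2_1(number, count):
--     if number == 1:
--         return count
--     if number % 3 == 0:
--         number = number // 3
--     else:
--         if number % 2 == 0:
--             number = number // 2
--         else:
--             number = number - 1
--     count += 1
--     # print (number,count)
--     return steps_2_1(number, count)
-- ===== SOURCE B (Python) =====
-- def steps_2_1(number, count):
--     while number != 1:
--         if number % 3 == 0:
--             number //= 3
--         elif number % 2 == 0:
--             number //= 2
--         else:
--             number -= 1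
--         count += 1
--     return count
-- ===== Notes on version B (the rewrite author's own statement) =====
-- stated objective: simpler
-- what changed: Replaced A's tail recursion (one stack frame per step, bounded by the recursion limit) with a plain while-loop that applies the same branch chain and increments a counter.
import Mathlib
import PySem

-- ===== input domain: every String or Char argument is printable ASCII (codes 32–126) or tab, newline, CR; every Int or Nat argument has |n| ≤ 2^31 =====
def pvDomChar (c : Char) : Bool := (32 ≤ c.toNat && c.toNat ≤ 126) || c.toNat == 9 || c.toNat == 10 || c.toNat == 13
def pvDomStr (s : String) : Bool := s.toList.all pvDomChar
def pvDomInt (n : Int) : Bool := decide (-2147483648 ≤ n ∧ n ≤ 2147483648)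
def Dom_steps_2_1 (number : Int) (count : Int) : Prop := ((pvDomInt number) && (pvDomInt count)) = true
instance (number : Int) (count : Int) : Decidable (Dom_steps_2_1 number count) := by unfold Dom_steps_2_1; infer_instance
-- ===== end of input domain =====

-- B replaces A's tail recursion by a plain while-loop with a counter (same branch chain); return values agree on number ≥ 1, where A terminates.

-- ===== PORT A =====
-- Literal transliteration of A's recursion. Python checks `number == 1`; for number < 1
-- the Python recursion never returns (RecursionError, excluded by Pre_), so the guard
-- `number ≤ 1` only serves to make the port total — inside Pre_ it coincides with `number == 1`.
def steps_2_1 (number : Int) (count : Int) : Int :=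
  if number ≤ 1 then count
  else if PySem.Int.mod number 3 = 0 then
    steps_2_1 (PySem.Int.floordiv number 3) (count + 1)
  else if PySem.Int.mod number 2 = 0 then
    steps_2_1 (PySem.Int.floordiv number 2) (count + 1)
  else
    steps_2_1 (number - 1) (count + 1)
termination_by number.toNat
decreasing_by
  all_goals first
    | (rw [PySem.Int.floordiv_eq_ediv_of_pos (by omega)]; omega)
    | omega

-- ===== PORT B =====
-- one greedy step of the while-loop body
def pvGreedyStep (n : Int) : Int :=
  if PySem.Int.mod n 3 = 0 then PySem.Int.floordiv n 3
  else if PySem.Int.mod n 2 = 0 then PySem.Int.floordiv n 2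
  else n - 1

theorem pvGreedyStep_lt (n : Int) (h : 1 < n) : (pvGreedyStep n).toNat < n.toNat := by
  unfold pvGreedyStep
  split_ifs with h3 h2 <;>
    first
      | (rw [PySem.Int.floordiv_eq_ediv_of_pos (by omega)]; omega)
      | omega

-- the while-loop: `while n != 1: n = step n; c += 1`; the `n ≤ 1` guard only makes it
-- total (Python's loop never exits for n < 1, excluded by Pre_)
def pvGreedyLoop (n : Int) (c : Int) : Int :=
  if h : n ≤ 1 then c else pvGreedyLoop (pvGreedyStep n) (c + 1)
termination_by n.toNat
decreasing_by exact pvGreedyStep_lt n (by omega)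

def steps_2_1_alt (number : Int) (count : Int) : Int := pvGreedyLoop number count

-- ===== PRECONDITION & SPEC =====
-- Pre_ excludes number < 1, on which Python A never returns (it recurses forever, RecursionError).
def Pre_steps_2_1 (number : Int) (count : Int) : Prop := 1 ≤ number
instance (number : Int) (count : Int) : Decidable (Pre_steps_2_1 number count) := by unfold Pre_steps_2_1; infer_instance
def pvWitness_steps_2_1 : Int × Int := (10, 0)

def Spec_steps_2_1 (number : Int) (count : Int) (out : Int) : Prop := out = steps_2_1_alt number count
instance (number : Int) (count : Int) (out : Int) : Decidable (Spec_steps_2_1 number count out) := by unfold Spec_steps_2_1; infer_instance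

-- ===== CLAIM (what is proved, stated in full; the proofs are below) =====
def Claim_equal_steps_2_1 : Prop := ∀ (number : Int) (count : Int), Dom_steps_2_1 number count → Pre_steps_2_1 number count → Spec_steps_2_1 number count (steps_2_1 number count)

-- ===== LEMMAS AND PROOFS =====
theorem steps_eq_loop (n c : Int) : steps_2_1 n c = pvGreedyLoop n c := by
  induction hm : n.toNat using Nat.strong_induction_on generalizing n c with
  | _ m ih =>
    rw [steps_2_1, pvGreedyLoop]
    by_cases h1 : n ≤ 1
    · simp [h1]
    · have hlt := pvGreedyStep_lt n (by omega)
      have key := ih (pvGreedyStep n).toNat (hm ▸ hlt) (pvGreedyStep n) (c + 1) rfl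
      rw [if_neg h1, dif_neg h1]
      unfold pvGreedyStep at key ⊢
      split_ifs at key ⊢ <;> exact key

-- ===== VERDICT (by name: the statement is the Claim_ definition above) =====
theorem steps_2_1_spec : Claim_equal_steps_2_1 := by
  intro n c _ _
  unfold Spec_steps_2_1 steps_2_1_alt
  exact steps_eq_loop n c
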